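-- pv_equiv track=rewrite | github.com/pypi-data/pypi-mirror-398 | packages/ngen-buildx/ngen_buildx-0.1.2.tar.gz/ngen_buildx-0.1.2/ngen_buildx/builder.py | format_command_for_display
-- ===== SOURCE A (Python) =====
-- from typing import Dict, Any, Optional, List
--
-- def format_command_for_display(cmd: List[str]) -> str:
--     """Format command list as a readable multi-line string.
--
--     Args:
--         cmd: Command as list of strings
--
--     Returns:
--         str: Formatted command string
--     """
--     lines = []
--     current_line = ""
--
--     for i, part in enumerate(cmd):
--         if part.startswith("--") or part.startswith("-f") or part.startswith("-t"):
--             if current_line: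
--                 lines.append(current_line)
--             current_line = f"  {part}"
--         elif current_line.startswith("  --") or current_line.startswith("  -"):
--             current_line += f" {part}"
--         else:
--             if current_line:
--                 current_line += f" {part}"
--             else:
--                 current_line = part
--
--     if current_line:
--         lines.append(current_line)
--
--     return " \\\n".join(lines)
-- ===== SOURCE B (Python) =====
-- from typing import List
--
--
-- def _is_flag(part: str) -> bool:
--     return part.startswith("--") or part.startswith("-f") or part.startswith("-t")
--
--
-- def format_command_for_display(cmd: List[str]) -> str:
--     """Format command list as a readable multi-line string.
--
--     Instead of grouping tokens into lines, emit the string token by token: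
--     each token after the first is preceded by the separator it needs
--     (' \\\n  ' before a flag, a plain space otherwise), and the first token
--     gets the '  ' indent exactly when it is itself a flag.  Leading empty
--     tokens contribute nothing to the display and are skipped.
--     """
--     i = 0
--     while i < len(cmd) and cmd[i] == "":
--         i += 1
--     toks = cmd[i:]
--     if not toks:
--         return ""
--     pieces = ["  " + toks[0] if _is_flag(toks[0]) else toks[0]]
--     for t in toks[1:]:
--         pieces.append(" \\\n  " + t if _is_flag(t) else " " + t)
--     return "".join(pieces)
-- ===== Notes on version B (the rewrite author's own statement) =====
-- stated objective: simpler
-- what changed: Drops A's grouping machinery (lines list + current_line state with its startswith-on-current-line branch) entirely: B never builds lines at all, it emits the output token by token, choosing for each token the separator that precedes it (' \\ ' before a flag, ' ' otherwise), after skipping the leading empty tokens that contribute nothing.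
import Mathlib
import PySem

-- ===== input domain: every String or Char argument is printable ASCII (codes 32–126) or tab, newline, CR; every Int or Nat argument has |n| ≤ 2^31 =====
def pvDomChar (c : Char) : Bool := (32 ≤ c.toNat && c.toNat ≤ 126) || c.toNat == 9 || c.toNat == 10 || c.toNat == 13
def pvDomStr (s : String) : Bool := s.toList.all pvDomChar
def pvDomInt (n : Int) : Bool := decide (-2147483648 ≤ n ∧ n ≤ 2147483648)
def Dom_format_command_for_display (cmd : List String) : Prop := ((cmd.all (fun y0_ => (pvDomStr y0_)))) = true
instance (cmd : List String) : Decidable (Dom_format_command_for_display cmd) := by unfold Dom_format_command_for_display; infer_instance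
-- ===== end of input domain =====

-- B drops A's lines/current_line grouping machinery and emits the output token by token,
-- choosing the separator that precedes each token; objective: simpler. A = B everywhere.

-- ===== PORT A =====
-- literal transliteration: the loop state is (lines, current_line); Python truthiness of a string
-- is ported as ≠ "".
def pvStepA (st : List String × String) (part : String) : List String × String :=
  if PySem.Str.startswith part "--" || PySem.Str.startswith part "-f" || PySem.Str.startswith part "-t" then
    ((if st.2 ≠ "" then st.1 ++ [st.2] else st.1), "  " ++ part)
  else if PySem.Str.startswith st.2 "  --" || PySem.Str.startswith st.2 "  -" then
    (st.1, st.2 ++ " " ++ part)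
  else if st.2 ≠ "" then (st.1, st.2 ++ " " ++ part)
  else (st.1, part)

def format_command_for_display (cmd : List String) : String :=
  let st := cmd.foldl pvStepA ([], "")
  PySem.Str.join " \\\n" (if st.2 ≠ "" then st.1 ++ [st.2] else st.1)

-- ===== PORT B =====
def pvIsFlag (part : String) : Bool :=
  PySem.Str.startswith part "--" || PySem.Str.startswith part "-f" || PySem.Str.startswith part "-t"

-- the separator-carrying piece emitted for each token after the first
def pvSep (p : String) : String := if pvIsFlag p then " \\\n  " ++ p else " " ++ p

def format_command_for_display_alt (cmd : List String) : String :=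
  match cmd.dropWhile (fun t => t == "") with   -- the initial while loop skipping empty tokens
  | [] => ""
  | h :: t => PySem.Str.join "" ((if pvIsFlag h then "  " ++ h else h) :: t.map pvSep)

-- ===== PRECONDITION & SPEC =====
def Spec_format_command_for_display (cmd : List String) (out : String) : Prop :=
  out = format_command_for_display_alt cmd
instance (cmd : List String) (out : String) : Decidable (Spec_format_command_for_display cmd out) := by
  unfold Spec_format_command_for_display; infer_instance

-- ===== CLAIM (what is proved, stated in full; the proofs are below) =====
def Claim_equal_format_command_for_display : Prop := ∀ (cmd : List String), Dom_format_command_for_display cmd → Spec_format_command_for_display cmd (format_command_for_display cmd)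

-- ===== LEMMAS AND PROOFS =====

-- the group decomposition A's loop computes: current group g, remaining tokens
def pvGrp (g : List String) : List String → List (List String)
  | [] => [g]
  | p :: rest => if pvIsFlag p then g :: pvGrp [p] rest else pvGrp (g ++ [p]) rest

def pvRender (g : List String) : String :=
  let text := PySem.Str.join " " g
  if pvIsFlag (g.headD "") then "  " ++ text else text

-- a current group: nonempty, and its head is a flag or a nonempty token
def pvGood (g : List String) : Prop :=
  g ≠ [] ∧ (pvIsFlag (g.headD "") = true ∨ g.headD "" ≠ "")

theorem pv_ne_empty_iff (s : String) : s ≠ "" ↔ s.toList ≠ [] := by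
  constructor
  · intro h hnil
    exact h (String.toList_inj.mp (by simp [hnil]))
  · intro h he
    exact h (by simp [he])

theorem pv_join_singleton (sep a : String) : PySem.Str.join sep [a] = a := by
  simp [PySem.Str.join, PySem.Chars.join_singleton]

theorem pv_join_cons_cons (sep a b : String) (r : List String) :
    PySem.Str.join sep (a :: b :: r) = a ++ sep ++ PySem.Str.join sep (b :: r) := by
  apply String.toList_inj.mp
  simp [PySem.Str.toList_join, PySem.Chars.join_cons_cons]

theorem pv_join_cons (sep a : String) (l : List String) (hl : l ≠ []) :
    PySem.Str.join sep (a :: l) = a ++ sep ++ PySem.Str.join sep l := by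
  cases l with
  | nil => exact absurd rfl hl
  | cons b r => exact pv_join_cons_cons sep a b r

theorem pv_join_nosep_cons (a : String) (l : List String) :
    PySem.Str.join "" (a :: l) = a ++ PySem.Str.join "" l := by
  cases l with
  | nil =>
    rw [pv_join_singleton]
    have h0 : PySem.Str.join "" ([] : List String) = "" := by decide
    rw [h0]
    simp
  | cons b r =>
    rw [pv_join_cons_cons]
    simp

theorem pv_join_append_last (sep p : String) : ∀ (g : List String), g ≠ [] →
    PySem.Str.join sep (g ++ [p]) = PySem.Str.join sep g ++ sep ++ p
  | [], hg => absurd rfl hg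
  | [a], _ => by simp [pv_join_cons_cons, pv_join_singleton]
  | a :: b :: r, _ => by
    have ih := pv_join_append_last sep p (b :: r) (by simp)
    calc PySem.Str.join sep ((a :: b :: r) ++ [p])
        = a ++ sep ++ PySem.Str.join sep ((b :: r) ++ [p]) := by
          rw [show (a :: b :: r) ++ [p] = a :: (b :: (r ++ [p])) from by simp]
          exact pv_join_cons_cons sep a b (r ++ [p])
      _ = a ++ sep ++ (PySem.Str.join sep (b :: r) ++ sep ++ p) := by rw [ih]
      _ = (a ++ sep ++ PySem.Str.join sep (b :: r)) ++ sep ++ p := by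
          simp [String.append_assoc]
      _ = PySem.Str.join sep (a :: b :: r) ++ sep ++ p := by rw [pv_join_cons_cons]

theorem pv_render_append (g : List String) (p : String) (hg : g ≠ []) :
    pvRender (g ++ [p]) = pvRender g ++ " " ++ p := by
  cases g with
  | nil => exact absurd rfl hg
  | cons a t =>
    simp only [pvRender, List.cons_append, List.headD_cons]
    rw [show (a :: (t ++ [p])) = (a :: t) ++ [p] from by simp,
      pv_join_append_last " " p (a :: t) (by simp)]
    split_ifs <;> simp [String.append_assoc]

theorem pv_render_ne_empty (g : List String) (hg : pvGood g) : pvRender g ≠ "" := by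
  obtain ⟨hne, hh⟩ := hg
  rw [pv_ne_empty_iff]
  cases g with
  | nil => exact absurd rfl hne
  | cons a t =>
    simp only [List.headD_cons] at hh
    simp only [pvRender, List.headD_cons]
    split_ifs with hf
    · simp
    · rcases hh with h | h
      · exact absurd h hf
      · cases t with
        | nil =>
          rw [pv_join_singleton]
          exact (pv_ne_empty_iff a).mp h
        | cons b r =>
          rw [pv_join_cons_cons]
          simp [String.toList_append]

theorem pv_stepA_eq (st : List String × String) (p : String) :
    pvStepA st p = if pvIsFlag p = true then
        ((if st.2 ≠ "" then st.1 ++ [st.2] else st.1), "  " ++ p)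
      else if st.2 ≠ "" then (st.1, st.2 ++ " " ++ p) else (st.1, p) := by
  obtain ⟨lines, cur⟩ := st
  by_cases hf : pvIsFlag p = true
  · rw [if_pos hf]
    unfold pvStepA
    rw [if_pos (show (PySem.Str.startswith p "--" || PySem.Str.startswith p "-f" || PySem.Str.startswith p "-t") = true from hf)]
  · rw [if_neg hf]
    unfold pvStepA
    rw [if_neg (show ¬ (PySem.Str.startswith p "--" || PySem.Str.startswith p "-f" || PySem.Str.startswith p "-t") = true from hf)]
    by_cases hc : cur = ""
    · subst hc
      rw [if_neg (show ¬ (PySem.Str.startswith "" "  --" || PySem.Str.startswith "" "  -") = true from by decide)]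
    · by_cases hs : (PySem.Str.startswith cur "  --" || PySem.Str.startswith cur "  -") = true
      · rw [if_pos hs]
        rw [if_pos (show cur ≠ "" from hc)]
      · rw [if_neg hs]

theorem pv_render_flag_singleton (p : String) (hf : pvIsFlag p = true) :
    pvRender [p] = "  " ++ p := by
  simp [pvRender, hf, pv_join_singleton]

-- A's loop, characterised by the group decomposition
theorem pvA_loop (xs : List String) : ∀ (lines g : List String), pvGood g →
    (PySem.Str.join " \\\n"
      (if (xs.foldl pvStepA (lines, pvRender g)).2 ≠ ""
        then (xs.foldl pvStepA (lines, pvRender g)).1 ++ [(xs.foldl pvStepA (lines, pvRender g)).2]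
        else (xs.foldl pvStepA (lines, pvRender g)).1))
    = PySem.Str.join " \\\n" (lines ++ (pvGrp g xs).map pvRender) := by
  induction xs with
  | nil =>
    intro lines g hg
    simp [pvGrp, pv_render_ne_empty g hg]
  | cons p rest ih =>
    intro lines g hg
    have hcur := pv_render_ne_empty g hg
    by_cases hf : pvIsFlag p = true
    · have hstep : pvStepA (lines, pvRender g) p = (lines ++ [pvRender g], pvRender [p]) := by
        rw [pv_stepA_eq]; simp [hf, hcur, pv_render_flag_singleton p hf]
      rw [List.foldl_cons, hstep, ih (lines ++ [pvRender g]) [p] ⟨by simp, Or.inl (by simpa using hf)⟩]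
      simp [pvGrp, hf]
    · have hstep : pvStepA (lines, pvRender g) p = (lines, pvRender (g ++ [p])) := by
        rw [pv_stepA_eq]
        simp [hf, hcur, pv_render_append g p hg.1]
      have hgood : pvGood (g ++ [p]) := by
        obtain ⟨hne, hh⟩ := hg
        cases g with
        | nil => exact absurd rfl hne
        | cons a t => exact ⟨by simp, by simpa using hh⟩
      rw [List.foldl_cons, hstep, ih lines (g ++ [p]) hgood]
      simp [pvGrp, hf]

theorem pv_grp_ne_nil (g : List String) (xs : List String) : pvGrp g xs ≠ [] := by
  induction xs generalizing g with
  | nil => simp [pvGrp]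
  | cons p rest ih =>
    simp only [pvGrp]
    split_ifs
    · simp
    · exact ih (g ++ [p])

-- B's token-by-token output equals the rendered group decomposition
theorem pvB_concat (xs : List String) : ∀ (g : List String), pvGood g →
    PySem.Str.join " \\\n" ((pvGrp g xs).map pvRender)
      = pvRender g ++ PySem.Str.join "" (xs.map pvSep) := by
  induction xs with
  | nil =>
    intro g _
    simp only [pvGrp, List.map_cons, List.map_nil]
    rw [pv_join_singleton]
    have h0 : PySem.Str.join "" ([] : List String) = "" := by decide
    rw [h0]
    simp
  | cons p rest ih =>
    intro g hg
    by_cases hf : pvIsFlag p = true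
    · have htail : (pvGrp [p] rest).map pvRender ≠ [] := by
        simp [pv_grp_ne_nil]
      simp only [pvGrp, hf, if_pos, List.map_cons]
      rw [pv_join_cons _ _ _ htail, ih [p] ⟨by simp, Or.inl (by simpa using hf)⟩,
        pv_render_flag_singleton p hf, pv_join_nosep_cons]
      simp only [pvSep, hf, if_pos]
      simp only [String.append_assoc]
      have hlit : (" \\\n  " : String) = " \\\n" ++ "  " := by decide
      rw [hlit, String.append_assoc]
    · have hgood : pvGood (g ++ [p]) := by
        obtain ⟨hne, hh⟩ := hg
        cases g with
        | nil => exact absurd rfl hne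
        | cons a t => exact ⟨by simp, by simpa using hh⟩
      simp only [pvGrp, hf, if_neg, Bool.not_eq_true, List.map_cons]
      rw [ih (g ++ [p]) hgood, pv_render_append g p hg.1, pv_join_nosep_cons]
      simp only [pvSep, hf]
      simp [String.append_assoc]

-- A's loop ignores a prefix of empty tokens
theorem pvA_skip (pfx : List String) (h : ∀ x ∈ pfx, x = "") :
    pfx.foldl pvStepA ([], "") = ([], "") := by
  induction pfx with
  | nil => rfl
  | cons a t ih =>
    have ha : a = "" := h a (by simp)
    subst ha
    have hstep : pvStepA (([] : List String), "") "" = ([], "") := by decide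
    rw [List.foldl_cons, hstep]
    exact ih (fun x hx => h x (by simp [hx]))

theorem pv_dropWhile_head (p : String → Bool) :
    ∀ (l : List String) (h : String) (t : List String),
      l.dropWhile p = h :: t → p h = false := by
  intro l
  induction l with
  | nil => intro h t he; simp [List.dropWhile] at he
  | cons a r ih =>
    intro h t he
    by_cases hp : p a = true
    · rw [List.dropWhile_cons_of_pos hp] at he
      exact ih h t he
    · rw [List.dropWhile_cons_of_neg hp] at he
      cases he
      simpa using hp

theorem pv_first_step (h : String) (_hh : h ≠ "") :
    pvStepA ([], "") h = ([], pvRender [h]) := by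
  rw [pv_stepA_eq]
  by_cases hf : pvIsFlag h = true
  · simp [hf, pv_render_flag_singleton h hf]
  · have hf' : pvIsFlag h = false := by simpa using hf
    simp [hf', pvRender, pv_join_singleton]

theorem pv_main (cmd : List String) :
    format_command_for_display cmd = format_command_for_display_alt cmd := by
  have hsplit : cmd = cmd.takeWhile (fun t => t == "") ++ cmd.dropWhile (fun t => t == "") :=
    (List.takeWhile_append_dropWhile).symm
  have hpfx : ∀ x ∈ cmd.takeWhile (fun t => t == ""), x = "" := by
    intro x hx
    have := List.mem_takeWhile_imp hx
    simpa using this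
  have hfoldl : cmd.foldl pvStepA ([], "")
      = (cmd.dropWhile (fun t => t == "")).foldl pvStepA ([], "") := by
    conv_lhs => rw [hsplit]
    rw [List.foldl_append, pvA_skip _ hpfx]
  cases hdrop : cmd.dropWhile (fun t => t == "") with
  | nil =>
    simp only [format_command_for_display, format_command_for_display_alt, hfoldl, hdrop]
    rfl
  | cons h t =>
    have hh : h ≠ "" := by
      have := pv_dropWhile_head (fun t => t == "") cmd h t hdrop
      simpa using this
    have hgood : pvGood [h] := ⟨by simp, Or.inr (by simpa using hh)⟩
    have hA : format_command_for_display cmd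
        = PySem.Str.join " \\\n" (((pvGrp [h] t)).map pvRender) := by
      simp only [format_command_for_display, hfoldl, hdrop, List.foldl_cons,
        pv_first_step h hh]
      simpa using pvA_loop t [] [h] hgood
    rw [hA, pvB_concat t [h] hgood]
    simp only [format_command_for_display_alt, hdrop]
    rw [pv_join_nosep_cons]
    congr 1
    simp only [pvRender, List.headD_cons]
    rw [pv_join_singleton]
    rfl

-- ===== VERDICT (by name: the statement is the Claim_ definition above) =====
theorem format_command_for_display_spec : Claim_equal_format_command_for_display := by
  intro cmd _
  exact pv_main cmd
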